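-- pv_equiv track=rewrite | github.com/bboddoFactory/everything-automate | src/workbench/graph.py | _dedupe_edges
-- ===== SOURCE A (Python) =====
-- from typing import Any
--
-- def _dedupe_edges(edges: list[dict[str, Any]]) -> list[dict[str, Any]]:
--     deduped: list[dict[str, Any]] = []
--     seen: set[tuple[str, str]] = set()
--     for edge in edges:
--         key = (edge["from_selection_id"], edge["to_selection_id"])
--         if key in seen:
--             continue
--         seen.add(key)
--         deduped.append(edge)
--     return deduped
-- ===== SOURCE B (Python) =====
-- from typing import Any
--
-- def _dedupe_edges(edges: list[dict[str, Any]]) -> list[dict[str, Any]]: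
--     deduped: list[dict[str, Any]] = []
--     remaining = list(edges)
--     while remaining:
--         head = remaining[0]
--         key = (head["from_selection_id"], head["to_selection_id"])
--         deduped.append(head)
--         remaining = [e for e in remaining[1:]
--                      if (e["from_selection_id"], e["to_selection_id"]) != key]
--     return deduped
-- ===== Notes on version B (the rewrite author's own statement) =====
-- stated objective: alternative
-- what changed: Replaces the seen-set single pass with a shrinking-worklist filter-nub: repeatedly take the first remaining edge and filter every later edge with the same (from,to) key out of the worklist, so no seen set or membership branch exists.
import Mathlib
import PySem

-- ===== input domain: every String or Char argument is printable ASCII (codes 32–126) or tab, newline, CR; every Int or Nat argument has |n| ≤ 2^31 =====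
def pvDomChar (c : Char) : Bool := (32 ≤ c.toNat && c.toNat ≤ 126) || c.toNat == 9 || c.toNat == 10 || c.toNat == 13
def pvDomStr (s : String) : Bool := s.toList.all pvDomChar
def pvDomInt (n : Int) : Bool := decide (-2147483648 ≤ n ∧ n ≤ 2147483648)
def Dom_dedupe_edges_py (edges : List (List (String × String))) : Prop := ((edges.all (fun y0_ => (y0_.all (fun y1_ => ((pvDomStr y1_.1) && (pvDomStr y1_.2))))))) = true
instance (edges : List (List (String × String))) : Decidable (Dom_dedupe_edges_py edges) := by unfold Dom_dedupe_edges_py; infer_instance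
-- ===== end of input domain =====

-- B replaces A's seen-set single pass with a shrinking-worklist filter-nub (take the
-- first remaining edge, drop all later edges with the same (from,to) key, repeat):
-- a different algorithm of similar size; not faster.


-- ===== PORT A =====
-- edge["k"] is exact under Pre_ (both keys present); getD's default is never reached there.
def dedupe_edges_py (edges : List (List (String × String))) : List (List (String × String)) :=
  (edges.foldl
    (fun (st : List (List (String × String)) × PySem.Set (String × String)) edge =>
      let key := ((PySem.Dict.mk edge).getD "from_selection_id" "",
                  (PySem.Dict.mk edge).getD "to_selection_id" "")
      if PySem.Set.contains st.2 key then st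
      else (st.1 ++ [edge], PySem.Set.add st.2 key))
    ([], PySem.Set.empty)).1

-- ===== PORT B =====
-- the (from,to) key of an edge, as B's Python reads it (exact under Pre_)
def edgeKey (edge : List (String × String)) : String × String :=
  ((PySem.Dict.mk edge).getD "from_selection_id" "",
   (PySem.Dict.mk edge).getD "to_selection_id" "")

-- B's while loop over the shrinking worklist `remaining` (terminates: the filtered tail is shorter)
def dedupeGo : List (List (String × String)) → List (List (String × String))
  | [] => []
  | head :: rest =>
      head :: dedupeGo (rest.filter (fun e => !(edgeKey e == edgeKey head)))
termination_by l => l.length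
decreasing_by
  simp only [List.length_cons, List.length_unattach]
  exact Nat.lt_succ_of_le (le_trans (List.length_filter_le _ _) (by simp))

def dedupe_edges_py_alt (edges : List (List (String × String))) : List (List (String × String)) :=
  dedupeGo edges

-- ===== PRECONDITION & SPEC =====
-- Pre_ excludes exactly the inputs where Python A raises KeyError: an edge dict missing
-- "from_selection_id" or "to_selection_id" (B raises there too).
def Pre_dedupe_edges_py (edges : List (List (String × String))) : Prop :=
  ∀ edge ∈ edges, (PySem.Dict.mk edge).contains "from_selection_id" = true ∧
                  (PySem.Dict.mk edge).contains "to_selection_id" = true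
instance (edges : List (List (String × String))) : Decidable (Pre_dedupe_edges_py edges) := by
  unfold Pre_dedupe_edges_py; infer_instance

def pvWitness_dedupe_edges_py : (List (List (String × String))) :=
  [[("from_selection_id", "a"), ("to_selection_id", "b")],
   [("from_selection_id", "a"), ("to_selection_id", "b"), ("kind", "x")]]

def Spec_dedupe_edges_py (edges : List (List (String × String))) (out : List (List (String × String))) : Prop := out = dedupe_edges_py_alt edges
instance (edges : List (List (String × String))) (out : List (List (String × String))) : Decidable (Spec_dedupe_edges_py edges out) := by unfold Spec_dedupe_edges_py; infer_instance

-- ===== CLAIM (what is proved, stated in full; the proofs are below) =====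
def Claim_equal_dedupe_edges_py : Prop := ∀ (edges : List (List (String × String))), Dom_dedupe_edges_py edges → Pre_dedupe_edges_py edges → Spec_dedupe_edges_py edges (dedupe_edges_py edges)

-- ===== LEMMAS AND PROOFS =====

-- A's loop body, named for the proofs (definitionally equal to the port's body)
def stepA (st : List (List (String × String)) × PySem.Set (String × String))
    (edge : List (String × String)) :
    List (List (String × String)) × PySem.Set (String × String) :=
  if PySem.Set.contains st.2 (edgeKey edge) then st
  else (st.1 ++ [edge], PySem.Set.add st.2 (edgeKey edge))

lemma portA_eq (edges : List (List (String × String))) :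
    dedupe_edges_py edges = (edges.foldl stepA ([], PySem.Set.empty)).1 := rfl

-- membership in a set after `add`
lemma set_contains_add (s : PySem.Set (String × String)) (k x : String × String) :
    PySem.Set.contains (PySem.Set.add s k) x =
      (PySem.Set.contains s x || x == k) := by
  by_cases hm : x ∈ s
  · by_cases hk : k ∈ s <;> simp [PySem.Set.add, PySem.Set.contains, hm, hk]
  · by_cases hk : k ∈ s <;> by_cases hx : x = k <;>
      simp_all [PySem.Set.add, PySem.Set.contains]

-- loop invariant: A's fold from (acc, s) yields acc ++ B's filter-nub of the edges
-- whose key is not yet in s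
lemma loop_inv (edges : List (List (String × String)))
    (acc : List (List (String × String))) (s : PySem.Set (String × String)) :
    (edges.foldl stepA (acc, s)).1 =
    acc ++ dedupeGo (edges.filter (fun e => !(PySem.Set.contains s (edgeKey e)))) := by
  induction edges generalizing acc s with
  | nil => simp [dedupeGo]
  | cons e rest ih =>
    rw [List.foldl_cons, List.filter_cons]
    by_cases hm : edgeKey e ∈ s
    · rw [show stepA (acc, s) e = (acc, s) from by simp [stepA, PySem.Set.contains, hm],
        if_neg (by simp [PySem.Set.contains, hm])]
      exact ih acc s
    · rw [show stepA (acc, s) e = (acc ++ [e], PySem.Set.add s (edgeKey e)) from by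
            simp [stepA, PySem.Set.contains, hm],
        if_pos (by simp [PySem.Set.contains, hm]),
        ih (acc ++ [e]) (PySem.Set.add s (edgeKey e))]
      have hf : List.filter (fun x => !(PySem.Set.contains (PySem.Set.add s (edgeKey e)) (edgeKey x))) rest
          = List.filter (fun x => !(edgeKey x == edgeKey e) && !(PySem.Set.contains s (edgeKey x))) rest := by
        apply List.filter_congr
        intro x _
        rw [set_contains_add]
        simp [Bool.not_or, Bool.and_comm]
      rw [hf]
      simp [dedupeGo, List.filter_filter]

-- ===== VERDICT (by name: the statement is the Claim_ definition above) =====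
theorem dedupe_edges_py_spec : Claim_equal_dedupe_edges_py := by
  intro edges _ _
  show dedupe_edges_py edges = dedupe_edges_py_alt edges
  rw [portA_eq, dedupe_edges_py_alt, loop_inv edges [] PySem.Set.empty]
  simp [PySem.Set.empty, PySem.Set.contains]
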